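-- pv_equiv track=rewrite | github.com/anthropics/original_performance_takehome | scripts/optimize_env.py | compute_base_offsets
-- ===== SOURCE A (Python) =====
-- def compute_base_offsets(
--     total_groups: int,
--     groups_per_batch: int,
--     spacing: int,
--     tail_spacing: int,
--     start_period: int,
--     jitter_pattern: list[int] | None,
--     jitter_pattern_tail: list[int] | None,
-- ) -> list[int]:
--     offsets: list[int] = []
--     batches = (total_groups + groups_per_batch - 1) // groups_per_batch
--     for batch in range(batches):
--         batch_groups = min(groups_per_batch, total_groups - batch * groups_per_batch)
--         batch_spacing = spacing
--         if batch_groups < groups_per_batch: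
--             batch_spacing = tail_spacing
--         pattern = jitter_pattern
--         if batch_groups < groups_per_batch and jitter_pattern_tail is not None:
--             pattern = jitter_pattern_tail
--         for g in range(batch_groups):
--             if start_period > 0:
--                 base = (g % start_period) * batch_spacing
--             else:
--                 base = g * batch_spacing
--             if pattern:
--                 base += pattern[g % len(pattern)]
--             offsets.append(base)
--     return offsets
-- ===== SOURCE B (Python) =====
-- def compute_base_offsets(
--     total_groups: int,
--     groups_per_batch: int,
--     spacing: int,
--     tail_spacing: int,
--     start_period: int,
--     jitter_pattern: list[int] | None,
--     jitter_pattern_tail: list[int] | None,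
-- ) -> list[int]:
--     if groups_per_batch <= 0:
--         return []
--     batches = (total_groups + groups_per_batch - 1) // groups_per_batch
--     has_tail = total_groups % groups_per_batch != 0
--
--     def offset_at(i: int) -> int:
--         batch, g = divmod(i, groups_per_batch)
--         tail = has_tail and batch == batches - 1
--         sp = tail_spacing if tail else spacing
--         pattern = jitter_pattern_tail if (tail and jitter_pattern_tail is not None) else jitter_pattern
--         base = (g % start_period) * sp if start_period > 0 else g * sp
--         if pattern:
--             base += pattern[g % len(pattern)]
--         return base
--
--     return [offset_at(i) for i in range(total_groups)]
-- ===== Notes on version B (the rewrite author's own statement) =====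
-- stated objective: simpler
-- what changed: Replaces the nested batch/group loops and per-batch spacing/pattern state with a single comprehension over the flat group index i, computing batch and in-batch position by divmod and deriving the tail condition arithmetically (total_groups % groups_per_batch != 0 and last batch).
import Mathlib
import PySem

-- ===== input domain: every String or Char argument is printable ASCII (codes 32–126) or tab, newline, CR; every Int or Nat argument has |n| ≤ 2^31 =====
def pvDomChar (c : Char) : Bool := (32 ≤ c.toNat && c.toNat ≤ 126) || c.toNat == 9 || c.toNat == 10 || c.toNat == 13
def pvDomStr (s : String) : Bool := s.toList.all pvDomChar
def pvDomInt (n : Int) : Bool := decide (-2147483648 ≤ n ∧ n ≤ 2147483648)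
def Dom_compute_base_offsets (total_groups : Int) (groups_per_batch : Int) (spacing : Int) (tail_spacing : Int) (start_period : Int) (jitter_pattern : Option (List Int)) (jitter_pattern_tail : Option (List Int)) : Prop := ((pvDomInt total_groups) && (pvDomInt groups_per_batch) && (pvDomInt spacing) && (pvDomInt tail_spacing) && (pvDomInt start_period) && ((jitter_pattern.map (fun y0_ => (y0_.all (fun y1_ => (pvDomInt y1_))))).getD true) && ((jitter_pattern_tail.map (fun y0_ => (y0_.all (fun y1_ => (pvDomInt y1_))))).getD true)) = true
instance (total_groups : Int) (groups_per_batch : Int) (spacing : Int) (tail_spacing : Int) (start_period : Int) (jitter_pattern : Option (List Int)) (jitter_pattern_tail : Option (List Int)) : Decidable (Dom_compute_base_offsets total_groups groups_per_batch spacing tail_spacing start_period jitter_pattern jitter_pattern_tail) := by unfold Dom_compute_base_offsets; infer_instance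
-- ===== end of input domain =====

-- B flattens A's nested batch/group loops into one map over the flat group index,
-- deriving batch, position and the tail condition arithmetically (objective: simpler).


-- ===== PORT A =====
def compute_base_offsets (total_groups : Int) (groups_per_batch : Int) (spacing : Int) (tail_spacing : Int) (start_period : Int) (jitter_pattern : Option (List Int)) (jitter_pattern_tail : Option (List Int)) : List Int :=
  let batches := PySem.Int.floordiv (total_groups + groups_per_batch - 1) groups_per_batch
  (PySem.List.pyRange 0 batches 1).foldl (fun offsets batch =>
    let batch_groups := min groups_per_batch (total_groups - batch * groups_per_batch)
    let batch_spacing := if batch_groups < groups_per_batch then tail_spacing else spacing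
    let pattern := if batch_groups < groups_per_batch ∧ jitter_pattern_tail ≠ none then jitter_pattern_tail else jitter_pattern
    (PySem.List.pyRange 0 batch_groups 1).foldl (fun offsets g =>
      let base := if start_period > 0 then (PySem.Int.mod g start_period) * batch_spacing else g * batch_spacing
      let base := match pattern with
        | some p => if p ≠ [] then base + PySem.List.pyGetD p (PySem.Int.mod g (p.length : Int)) 0 else base
        | none => base
      offsets ++ [base]) offsets) []

-- ===== PORT B =====
-- B-side helper: the Python closure offset_at(i)
def pvOffsetAt (total_groups : Int) (groups_per_batch : Int) (spacing : Int) (tail_spacing : Int) (start_period : Int) (jitter_pattern : Option (List Int)) (jitter_pattern_tail : Option (List Int)) (i : Int) : Int :=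
  let batches := PySem.Int.floordiv (total_groups + groups_per_batch - 1) groups_per_batch
  let has_tail := PySem.Int.mod total_groups groups_per_batch ≠ 0
  let batch := PySem.Int.floordiv i groups_per_batch
  let g := PySem.Int.mod i groups_per_batch
  let tail := has_tail ∧ batch = batches - 1
  let sp := if tail then tail_spacing else spacing
  let pattern := if tail ∧ jitter_pattern_tail ≠ none then jitter_pattern_tail else jitter_pattern
  let base := if start_period > 0 then (PySem.Int.mod g start_period) * sp else g * sp
  match pattern with
  | some p => if p ≠ [] then base + PySem.List.pyGetD p (PySem.Int.mod g (p.length : Int)) 0 else base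
  | none => base

def compute_base_offsets_alt (total_groups : Int) (groups_per_batch : Int) (spacing : Int) (tail_spacing : Int) (start_period : Int) (jitter_pattern : Option (List Int)) (jitter_pattern_tail : Option (List Int)) : List Int :=
  if groups_per_batch ≤ 0 then []
  else (PySem.List.pyRange 0 total_groups 1).map
    (pvOffsetAt total_groups groups_per_batch spacing tail_spacing start_period jitter_pattern jitter_pattern_tail)

-- ===== PRECONDITION & SPEC =====
-- Pre_ excludes exactly groups_per_batch = 0, where Python A raises ZeroDivisionError (B returns [] there).
def Pre_compute_base_offsets (total_groups : Int) (groups_per_batch : Int) (spacing : Int) (tail_spacing : Int) (start_period : Int) (jitter_pattern : Option (List Int)) (jitter_pattern_tail : Option (List Int)) : Prop := groups_per_batch ≠ 0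
instance (total_groups : Int) (groups_per_batch : Int) (spacing : Int) (tail_spacing : Int) (start_period : Int) (jitter_pattern : Option (List Int)) (jitter_pattern_tail : Option (List Int)) : Decidable (Pre_compute_base_offsets total_groups groups_per_batch spacing tail_spacing start_period jitter_pattern jitter_pattern_tail) := by unfold Pre_compute_base_offsets; infer_instance
def pvWitness_compute_base_offsets : Int × Int × Int × Int × Int × Option (List Int) × Option (List Int) := (7, 3, 10, 4, 2, some [1, 2], some [5])

def Spec_compute_base_offsets (total_groups : Int) (groups_per_batch : Int) (spacing : Int) (tail_spacing : Int) (start_period : Int) (jitter_pattern : Option (List Int)) (jitter_pattern_tail : Option (List Int)) (out : List Int) : Prop := out = compute_base_offsets_alt total_groups groups_per_batch spacing tail_spacing start_period jitter_pattern jitter_pattern_tail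
instance (total_groups : Int) (groups_per_batch : Int) (spacing : Int) (tail_spacing : Int) (start_period : Int) (jitter_pattern : Option (List Int)) (jitter_pattern_tail : Option (List Int)) (out : List Int) : Decidable (Spec_compute_base_offsets total_groups groups_per_batch spacing tail_spacing start_period jitter_pattern jitter_pattern_tail out) := by unfold Spec_compute_base_offsets; infer_instance

-- ===== CLAIM (what is proved, stated in full; the proofs are below) =====
def Claim_equal_compute_base_offsets : Prop := ∀ (total_groups : Int) (groups_per_batch : Int) (spacing : Int) (tail_spacing : Int) (start_period : Int) (jitter_pattern : Option (List Int)) (jitter_pattern_tail : Option (List Int)), Dom_compute_base_offsets total_groups groups_per_batch spacing tail_spacing start_period jitter_pattern jitter_pattern_tail → Pre_compute_base_offsets total_groups groups_per_batch spacing tail_spacing start_period jitter_pattern jitter_pattern_tail → Spec_compute_base_offsets total_groups groups_per_batch spacing tail_spacing start_period jitter_pattern jitter_pattern_tail (compute_base_offsets total_groups groups_per_batch spacing tail_spacing start_period jitter_pattern jitter_pattern_tail)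
-- ===== LEMMAS AND PROOFS =====

-- appending-fold is a map
theorem pv_foldl_snoc (f : Int → Int) (l : List Int) : ∀ (acc : List Int),
    l.foldl (fun out i => out ++ [f i]) acc = acc ++ l.map f := by
  induction l with
  | nil => intro acc; simp
  | cons x t ih => intro acc; simp [ih]

-- shift a mapped range, pointwise on members
theorem pv_map_shift (E F : Int → Int) (s m : Int)
    (h : ∀ g, 0 ≤ g → g < m → E g = F (s + g)) :
    (PySem.List.pyRange 0 m 1).map E = (PySem.List.pyRange s (s + m) 1).map F := by
  rw [PySem.List.pyRange_one 0 m, PySem.List.pyRange_one s (s + m)]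
  simp only [List.map_map, sub_zero, add_sub_cancel_left]
  apply List.map_congr_left
  intro k hk
  have hk' : (k : Int) < m := by
    have := List.mem_range.mp hk
    omega
  simp only [Function.comp_apply, zero_add]
  exact h k (by positivity) hk'

-- ceiling-division sandwich: tg ≤ q*gpb and (q-1)*gpb ≤ tg - 1   (gpb > 0)
theorem pv_q_sandwich (tg gpb : Int) (hg : 0 < gpb) :
    tg ≤ (tg + gpb - 1) / gpb * gpb ∧ ((tg + gpb - 1) / gpb - 1) * gpb ≤ tg - 1 := by
  have h1 := Int.ediv_mul_le (tg + gpb - 1) (ne_of_gt hg)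
  have h2 := Int.lt_ediv_add_one_mul_self (tg + gpb - 1) hg
  have e1 : ((tg + gpb - 1) / gpb + 1) * gpb = (tg + gpb - 1) / gpb * gpb + gpb := by ring
  have e2 : ((tg + gpb - 1) / gpb - 1) * gpb = (tg + gpb - 1) / gpb * gpb - gpb := by ring
  constructor <;> linarith

-- the tail condition, arithmetically
theorem pv_tail_iff (tg gpb b : Int) (hg : 0 < gpb) (hb0 : 0 ≤ b)
    (hbq : b < (tg + gpb - 1) / gpb) :
    (min gpb (tg - b * gpb) < gpb) ↔
      (PySem.Int.mod tg gpb ≠ 0 ∧ b = (tg + gpb - 1) / gpb - 1) := by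
  set q := (tg + gpb - 1) / gpb with hqdef
  set R := (tg + gpb - 1) % gpb with hRdef
  have hR0 : 0 ≤ R := Int.emod_nonneg _ (ne_of_gt hg)
  have hRlt : R < gpb := Int.emod_lt_of_pos _ hg
  have hid : gpb * q + R = tg + gpb - 1 := by rw [hqdef, hRdef]; exact Int.ediv_add_emod _ _
  have htg : tg = (R - gpb + 1) + q * gpb := by linarith
  have hmodval : PySem.Int.mod tg gpb = if R = gpb - 1 then 0 else R + 1 := by
    rw [PySem.Int.mod_eq_emod_of_pos hg,
      show tg = (R - gpb + 1) + gpb * q from by linarith, Int.add_mul_emod_self_left,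
      show R - gpb + 1 = (R + 1) + gpb * (-1) from by ring, Int.add_mul_emod_self_left]
    by_cases h : R = gpb - 1
    · rw [if_pos h, h, show gpb - 1 + 1 = gpb from by ring, Int.emod_self]
    · have hlt : R + 1 < gpb := lt_of_le_of_ne (by linarith) (fun hh => h (by linarith))
      rw [if_neg h, Int.emod_eq_of_lt (by linarith) hlt]
  have hlhs : (min gpb (tg - b * gpb) < gpb) ↔ tg < b * gpb + gpb := by
    rw [min_lt_iff]
    constructor
    · rintro (h | h)
      · exact absurd h (lt_irrefl _)
      · linarith
    · intro h; exact Or.inr (by linarith)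
  rw [hlhs, hmodval]
  by_cases hlast : b = q - 1
  · subst hlast
    have e1 : (q - 1) * gpb + gpb = q * gpb := by ring
    constructor
    · intro h
      refine ⟨?_, rfl⟩
      by_cases hR : R = gpb - 1
      · exfalso
        have htgq : tg = q * gpb := by rw [htg, hR]; ring
        linarith
      · rw [if_neg hR]; linarith
    · rintro ⟨h, -⟩
      by_cases hR : R = gpb - 1
      · rw [if_pos hR] at h; exact absurd rfl h
      · have hRlt2 : R < gpb - 1 := lt_of_le_of_ne (by linarith) hR
        rw [htg]; linarith
  · have hble : b ≤ q - 2 := by omega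
    have hmul : b * gpb ≤ (q - 2) * gpb :=
      mul_le_mul_of_nonneg_right hble (le_of_lt hg)
    have e2 : (q - 2) * gpb = q * gpb - 2 * gpb := by ring
    constructor
    · intro h; exfalso; linarith
    · rintro ⟨-, h⟩; exact absurd h hlast

-- B's element at flat index b*gpb+g equals A's inner-loop value in batch b
theorem pv_elem_eq (tg gpb sp ts sper : Int) (jp jpt : Option (List Int))
    (hg : 0 < gpb) (b g : Int) (hb0 : 0 ≤ b)
    (hbq : b < (tg + gpb - 1) / gpb)
    (hg0 : 0 ≤ g) (hglt : g < min gpb (tg - b * gpb)) :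
    pvOffsetAt tg gpb sp ts sper jp jpt (b * gpb + g) =
      (let batch_groups := min gpb (tg - b * gpb)
       let batch_spacing := if batch_groups < gpb then ts else sp
       let pattern := if batch_groups < gpb ∧ jpt ≠ none then jpt else jp
       let base := if sper > 0 then (PySem.Int.mod g sper) * batch_spacing else g * batch_spacing
       match pattern with
       | some p => if p ≠ [] then base + PySem.List.pyGetD p (PySem.Int.mod g (p.length : Int)) 0 else base
       | none => base) := by
  have hglt' : g < gpb := lt_of_lt_of_le hglt (min_le_left _ _)
  have hdiv : PySem.Int.floordiv (b * gpb + g) gpb = b := by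
    rw [PySem.Int.floordiv_eq_ediv_of_pos hg,
      show b * gpb + g = g + b * gpb from by ring,
      Int.add_mul_ediv_right _ _ (ne_of_gt hg),
      Int.ediv_eq_zero_of_lt hg0 hglt']
    ring
  have hmod : PySem.Int.mod (b * gpb + g) gpb = g := by
    rw [PySem.Int.mod_eq_emod_of_pos hg,
      show b * gpb + g = g + gpb * b from by ring,
      Int.add_mul_emod_self_left, Int.emod_eq_of_lt hg0 hglt']
  have hq : PySem.Int.floordiv (tg + gpb - 1) gpb = (tg + gpb - 1) / gpb :=
    PySem.Int.floordiv_eq_ediv_of_pos hg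
  have htail := pv_tail_iff tg gpb b hg hb0 hbq
  simp only [pvOffsetAt, hdiv, hmod, hq]
  simp only [← htail]

-- with gpb < 0 every batch is empty, so A's outer fold returns its accumulator
theorem pv_neg_loop (tg gpb sp ts sper : Int) (jp jpt : Option (List Int))
    (hg : gpb < 0) (l : List Int) : ∀ (acc : List Int),
    l.foldl (fun offsets batch =>
      let batch_groups := min gpb (tg - batch * gpb)
      let batch_spacing := if batch_groups < gpb then ts else sp
      let pattern := if batch_groups < gpb ∧ jpt ≠ none then jpt else jp
      (PySem.List.pyRange 0 batch_groups 1).foldl (fun offsets g =>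
        let base := if sper > 0 then (PySem.Int.mod g sper) * batch_spacing else g * batch_spacing
        let base := match pattern with
          | some p => if p ≠ [] then base + PySem.List.pyGetD p (PySem.Int.mod g (p.length : Int)) 0 else base
          | none => base
        offsets ++ [base]) offsets) acc = acc := by
  induction l with
  | nil => intro acc; simp
  | cons b t ih =>
    intro acc
    rw [List.foldl_cons]
    have hnil : PySem.List.pyRange 0 (min gpb (tg - b * gpb)) 1 = [] :=
      PySem.List.pyRange_one_eq_nil (le_trans (min_le_left _ _) (le_of_lt hg))
    simp only [hnil, List.foldl_nil]
    exact ih acc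

-- the outer loop of A, from batch b on, appends exactly B's map from index b*gpb on
theorem pv_outer_loop (tg gpb sp ts sper : Int) (jp jpt : Option (List Int))
    (hg : 0 < gpb) (n : Nat) : ∀ (b : Int) (acc : List Int), 0 ≤ b →
    b + (n : Int) = (tg + gpb - 1) / gpb →
    (PySem.List.pyRange b ((tg + gpb - 1) / gpb) 1).foldl
      (fun offsets batch =>
        let batch_groups := min gpb (tg - batch * gpb)
        let batch_spacing := if batch_groups < gpb then ts else sp
        let pattern := if batch_groups < gpb ∧ jpt ≠ none then jpt else jp
        (PySem.List.pyRange 0 batch_groups 1).foldl (fun offsets g =>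
          let base := if sper > 0 then (PySem.Int.mod g sper) * batch_spacing else g * batch_spacing
          let base := match pattern with
            | some p => if p ≠ [] then base + PySem.List.pyGetD p (PySem.Int.mod g (p.length : Int)) 0 else base
            | none => base
          offsets ++ [base]) offsets) acc
    = acc ++ (PySem.List.pyRange (b * gpb) tg 1).map (pvOffsetAt tg gpb sp ts sper jp jpt) := by
  induction n with
  | zero =>
    intro b acc hb0 hbq
    simp only [Nat.cast_zero, add_zero] at hbq
    subst hbq
    obtain ⟨hq1, -⟩ := pv_q_sandwich tg gpb hg
    rw [PySem.List.pyRange_one_eq_nil (le_refl _), PySem.List.pyRange_one_eq_nil hq1]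
    simp
  | succ n ih =>
    intro b acc hb0 hbq
    push_cast at hbq
    have hn0 : (0 : Int) ≤ (n : Int) := Int.natCast_nonneg n
    have hblt : b < (tg + gpb - 1) / gpb := by linarith
    obtain ⟨hq1, hq2⟩ := pv_q_sandwich tg gpb hg
    have hbmul : b * gpb ≤ ((tg + gpb - 1) / gpb - 1) * gpb :=
      mul_le_mul_of_nonneg_right (by linarith) (le_of_lt hg)
    have hbtg : b * gpb ≤ tg - 1 := le_trans hbmul hq2
    rw [PySem.List.pyRange_one_cons hblt, List.foldl_cons]
    have hstep : ∀ acc' : List Int,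
        (let batch_groups := min gpb (tg - b * gpb)
         let batch_spacing := if batch_groups < gpb then ts else sp
         let pattern := if batch_groups < gpb ∧ jpt ≠ none then jpt else jp
         (PySem.List.pyRange 0 batch_groups 1).foldl (fun offsets g =>
           let base := if sper > 0 then (PySem.Int.mod g sper) * batch_spacing else g * batch_spacing
           let base := match pattern with
             | some p => if p ≠ [] then base + PySem.List.pyGetD p (PySem.Int.mod g (p.length : Int)) 0 else base
             | none => base
           offsets ++ [base]) acc')
        = acc' ++ (PySem.List.pyRange (b * gpb) (b * gpb + min gpb (tg - b * gpb)) 1).map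
            (pvOffsetAt tg gpb sp ts sper jp jpt) := by
      intro acc'
      rw [pv_foldl_snoc]
      congr 1
      apply pv_map_shift
      intro g hg0 hglt
      exact (pv_elem_eq tg gpb sp ts sper jp jpt hg b g hb0 hblt hg0 hglt).symm
    rw [hstep acc, ih (b + 1) _ (by linarith) (by linarith)]
    rw [List.append_assoc, ← List.map_append]
    have hsplit : PySem.List.pyRange (b * gpb) (b * gpb + min gpb (tg - b * gpb)) 1 ++
        PySem.List.pyRange ((b + 1) * gpb) tg 1 = PySem.List.pyRange (b * gpb) tg 1 := by
      by_cases hfull : (b + 1) * gpb ≤ tg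
      · have hfull' : b * gpb + gpb ≤ tg := by
          have : (b + 1) * gpb = b * gpb + gpb := by ring
          linarith
        have hmin : min gpb (tg - b * gpb) = gpb := min_eq_left (by linarith)
        rw [hmin, show b * gpb + gpb = (b + 1) * gpb from by ring]
        exact (PySem.List.pyRange_one_append (b * gpb) ((b + 1) * gpb) tg
          (by linarith [show (b + 1) * gpb = b * gpb + gpb from by ring]) hfull).symm
      · have hfull' : tg < (b + 1) * gpb := not_le.mp hfull
        have hfull'' : tg - b * gpb ≤ gpb := by
          have : (b + 1) * gpb = b * gpb + gpb := by ring
          linarith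
        have hmin : min gpb (tg - b * gpb) = tg - b * gpb := min_eq_right hfull''
        rw [hmin, show b * gpb + (tg - b * gpb) = tg from by ring,
          PySem.List.pyRange_one_eq_nil (le_of_lt hfull')]
        simp
    rw [hsplit]

-- A as a map over the flat index (gpb > 0)
theorem pv_A_eq_map (tg gpb sp ts sper : Int) (jp jpt : Option (List Int)) (hg : 0 < gpb) :
    compute_base_offsets tg gpb sp ts sper jp jpt =
      (PySem.List.pyRange 0 tg 1).map (pvOffsetAt tg gpb sp ts sper jp jpt) := by
  have hq : PySem.Int.floordiv (tg + gpb - 1) gpb = (tg + gpb - 1) / gpb :=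
    PySem.Int.floordiv_eq_ediv_of_pos hg
  simp only [compute_base_offsets, hq]
  by_cases hq0 : 0 ≤ (tg + gpb - 1) / gpb
  · have := pv_outer_loop tg gpb sp ts sper jp jpt hg ((tg + gpb - 1) / gpb).toNat 0 []
      (le_refl 0) (by rw [Int.toNat_of_nonneg hq0]; ring)
    rw [zero_mul] at this
    simpa using this
  · obtain ⟨hq1, -⟩ := pv_q_sandwich tg gpb hg
    have hqneg : (tg + gpb - 1) / gpb < 0 := not_le.mp hq0
    have hmul : (tg + gpb - 1) / gpb * gpb < 0 := mul_neg_of_neg_of_pos hqneg hg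
    rw [PySem.List.pyRange_one_eq_nil (le_of_lt hqneg),
      PySem.List.pyRange_one_eq_nil (by linarith : tg ≤ (0 : Int))]
    simp

-- ===== VERDICT (by name: the statement is the Claim_ definition above) =====
theorem compute_base_offsets_spec : Claim_equal_compute_base_offsets := by
  intro tg gpb sp ts sper jp jpt hdom hpre
  unfold Pre_compute_base_offsets at hpre
  unfold Spec_compute_base_offsets compute_base_offsets_alt
  rcases lt_trichotomy gpb 0 with hg | hg | hg
  · rw [if_pos (le_of_lt hg)]
    simp only [compute_base_offsets]
    exact pv_neg_loop tg gpb sp ts sper jp jpt hg _ []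
  · exact absurd hg hpre
  · rw [if_neg (by linarith)]
    exact pv_A_eq_map tg gpb sp ts sper jp jpt hg
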